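-- pv_equiv track=rewrite | github.com/PrathamBhavsar/fik-scraper | video_downloader_organizer.py | parse_m3u8_attributes
-- ===== SOURCE A (Python) =====
-- from typing import Dict, List, Optional, Any, Tuple
--
-- def parse_m3u8_attributes(line: str) -> Dict[str, str]:
--     """
--     Parse key=value pairs from M3U8 attribute lines
--     Handles quoted values and comma separation correctly
--     """
--     attrs = {}
--     if ':' in line:
--         line = line.split(':', 1)[1]
--
--     # Manual parsing to handle quoted values with commas
--     pairs = []
--     current = ''
--     in_quotes = False
--
--     for c in line:
--         if c == '"':
--             in_quotes = not in_quotes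
--             current += c
--         elif c == ',' and not in_quotes:
--             if current.strip():
--                 pairs.append(current.strip())
--             current = ''
--         else:
--             current += c
--
--     if current.strip():
--         pairs.append(current.strip())
--
--     # Parse each pair
--     for pair in pairs:
--         if '=' in pair:
--             k, v = pair.split('=', 1)
--             # Remove quotes from value if present
--             v = v.strip()
--             if v.startswith('"') and v.endswith('"'):
--                 v = v[1:-1]
--             attrs[k.strip()] = v
--
--     return attrs
-- ===== SOURCE B (Python) =====
-- def parse_m3u8_attributes(line: str):
--     """
--     Parse key=value pairs from M3U8 attribute lines.
--     Splits the line by '"' so quoted spans (odd segments) keep their commas,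
--     instead of scanning char-by-char with an in_quotes flag.
--     """
--     if ':' in line:
--         line = line.split(':', 1)[1]
--
--     pieces = ['']
--     for i, seg in enumerate(line.split('"')):
--         if i:
--             pieces[-1] += '"'
--         if i % 2 == 0:
--             parts = seg.split(',')
--             pieces[-1] += parts[0]
--             pieces.extend(parts[1:])
--         else:
--             pieces[-1] += seg
--
--     attrs = {}
--     for piece in pieces:
--         piece = piece.strip()
--         if piece and '=' in piece:
--             k, v = piece.split('=', 1)
--             v = v.strip()
--             if v.startswith('"') and v.endswith('"'):
--                 v = v[1:-1]
--             attrs[k.strip()] = v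
--     return attrs
-- ===== Notes on version B (the rewrite author's own statement) =====
-- stated objective: faster
-- what changed: Replaces the char-by-char in_quotes state-machine scan with splitting the line at the quote character (odd-indexed segments are quoted, so only even segments are split on commas), then the same key=value parsing per piece.
import Mathlib
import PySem

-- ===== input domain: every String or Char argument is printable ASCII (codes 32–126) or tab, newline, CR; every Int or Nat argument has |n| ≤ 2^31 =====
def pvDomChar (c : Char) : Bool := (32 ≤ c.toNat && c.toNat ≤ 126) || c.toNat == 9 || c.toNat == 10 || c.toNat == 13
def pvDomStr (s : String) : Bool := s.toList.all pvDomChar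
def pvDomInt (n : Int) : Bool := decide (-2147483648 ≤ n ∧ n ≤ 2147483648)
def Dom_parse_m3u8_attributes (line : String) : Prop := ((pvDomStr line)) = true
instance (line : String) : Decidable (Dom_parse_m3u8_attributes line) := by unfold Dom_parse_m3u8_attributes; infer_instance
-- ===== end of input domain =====

-- B replaces A's char-by-char in_quotes scan by splitting the line at the quote character (odd
-- segments are quoted, so their commas never split); measurably faster (C-level str.split
-- instead of a per-char Python loop), same return value.

-- ===== PORT A =====
-- the for-c-in-line scan: state = (pairs, current, in_quotes)
def pvA_scanStep (st : List (List Char) × List Char × Bool) (c : Char) :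
    List (List Char) × List Char × Bool :=
  if c = '"' then (st.1, st.2.1 ++ [c], !st.2.2)
  else if c = ',' ∧ st.2.2 = false then
    ((if PySem.Chars.strip st.2.1 ≠ [] then st.1 ++ [PySem.Chars.strip st.2.1] else st.1),
     [], st.2.2)
  else (st.1, st.2.1 ++ [c], st.2.2)

-- the for-pair-in-pairs loop body
def pvA_pairStep (d : PySem.Dict String String) (pair : List Char) : PySem.Dict String String :=
  if PySem.Chars.isIn ['='] pair then
    let kv := PySem.Chars.splitOnMax pair ['='] 1
    let k := kv.getD 0 []
    let v := PySem.Chars.strip (kv.getD 1 [])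
    let v := if PySem.Chars.startswith v ['"'] && PySem.Chars.endswith v ['"']
             then PySem.List.slice v (some 1) (some (-1)) else v
    d.insert (String.ofList (PySem.Chars.strip k)) (String.ofList v)
  else d

def parse_m3u8_attributes (line : String) : List (String × String) :=
  let line := if PySem.Str.isIn ":" line
              then ((PySem.Str.splitMax? line ":" 1).getD []).getD 1 line else line
  let st := line.toList.foldl pvA_scanStep ([], [], false)
  let pairs := if PySem.Chars.strip st.2.1 ≠ [] then st.1 ++ [PySem.Chars.strip st.2.1] else st.1
  (pairs.foldl pvA_pairStep PySem.Dict.empty).items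

-- ===== PORT B =====
-- the for-(i, seg)-in-enumerate loop body: pieces[-1] += …, pieces.extend(…)
def pvB_segStep (pieces : List (List Char)) (iseg : Int × List Char) : List (List Char) :=
  let pieces := if iseg.1 ≠ 0 then pieces.dropLast ++ [pieces.getLastD [] ++ ['"']] else pieces
  if PySem.Int.mod iseg.1 2 = 0 then
    let parts := PySem.Chars.splitOn iseg.2 [',']
    (pieces.dropLast ++ [pieces.getLastD [] ++ parts.getD 0 []]) ++ PySem.List.slice parts (some 1) none
  else pieces.dropLast ++ [pieces.getLastD [] ++ iseg.2]

-- the for-piece-in-pieces loop body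
def pvB_pieceStep (d : PySem.Dict String String) (piece0 : List Char) : PySem.Dict String String :=
  let piece := PySem.Chars.strip piece0
  if piece ≠ [] ∧ PySem.Chars.isIn ['='] piece then
    let kv := PySem.Chars.splitOnMax piece ['='] 1
    let k := kv.getD 0 []
    let v := PySem.Chars.strip (kv.getD 1 [])
    let v := if PySem.Chars.startswith v ['"'] && PySem.Chars.endswith v ['"']
             then PySem.List.slice v (some 1) (some (-1)) else v
    d.insert (String.ofList (PySem.Chars.strip k)) (String.ofList v)
  else d

def parse_m3u8_attributes_alt (line : String) : List (String × String) :=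
  let line := if PySem.Str.isIn ":" line
              then ((PySem.Str.splitMax? line ":" 1).getD []).getD 1 line else line
  let pieces := (PySem.List.enumerate (PySem.Chars.splitOn line.toList ['"'])).foldl pvB_segStep [[]]
  (pieces.foldl pvB_pieceStep PySem.Dict.empty).items

-- ===== PRECONDITION & SPEC =====
def Spec_parse_m3u8_attributes (line : String) (out : List (String × String)) : Prop := out = parse_m3u8_attributes_alt line
instance (line : String) (out : List (String × String)) : Decidable (Spec_parse_m3u8_attributes line out) := by unfold Spec_parse_m3u8_attributes; infer_instance

-- ===== CLAIM (what is proved, stated in full; the proofs are below) =====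
def Claim_equal_parse_m3u8_attributes : Prop := ∀ (line : String), Dom_parse_m3u8_attributes line → Spec_parse_m3u8_attributes line (parse_m3u8_attributes line)

-- ===== LEMMAS AND PROOFS =====

-- reference single-char split: pvSplitQ q s = (first chunk, later chunks) of s.split(q)
def pvSplitQ (q : Char) : List Char → List Char × List (List Char)
  | [] => ([], [])
  | c :: r =>
    if c = q then ([], (pvSplitQ q r).1 :: (pvSplitQ q r).2)
    else (c :: (pvSplitQ q r).1, (pvSplitQ q r).2)

-- strip every chunk, drop the empty ones (A's pairs, B's piece filter)
def pvStripF (l : List (List Char)) : List (List Char) :=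
  (l.map PySem.Chars.strip).filter (fun x => decide (x ≠ []))

theorem pvStripF_append (l₁ l₂ : List (List Char)) :
    pvStripF (l₁ ++ l₂) = pvStripF l₁ ++ pvStripF l₂ := by
  simp [pvStripF]

theorem pvStripF_cons (x : List Char) (l : List (List Char)) :
    pvStripF (x :: l) =
      (if PySem.Chars.strip x ≠ [] then [PySem.Chars.strip x] else []) ++ pvStripF l := by
  simp only [pvStripF, List.map_cons, List.filter_cons]
  split_ifs with h₁ h₂ h₂ <;> simp_all

theorem pvDropLast_append_getLastD (l : List (List Char)) (h : l ≠ []) :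
    l.dropLast ++ [l.getLastD []] = l := by
  induction l with
  | nil => simp at h
  | cons a t ih =>
    cases t with
    | nil => rfl
    | cons b t' => simpa using ih (by simp)

theorem pvSplitOn_go_eq (q : Char) (l : List Char) :
    ∀ (fuel : Nat) (cur : List Char) (acc : List (List Char)), l.length < fuel →
      PySem.Chars.splitOn.go [q] fuel l cur acc =
        acc.reverse ++ (cur.reverse ++ (pvSplitQ q l).1) :: (pvSplitQ q l).2 := by
  induction l with
  | nil =>
    intro fuel cur acc hf
    cases fuel with
    | zero => omega
    | succ f => simp [PySem.Chars.splitOn.go, pvSplitQ]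
  | cons c r ih =>
    intro fuel cur acc hf
    cases fuel with
    | zero => omega
    | succ f =>
      by_cases hc : c = q
      · subst hc
        have hpre : List.isPrefixOf [c] (c :: r) = true := by simp [List.isPrefixOf]
        simp only [PySem.Chars.splitOn.go, hpre, if_true, List.length_cons, List.length_nil,
          List.drop_succ_cons, List.drop_zero]
        rw [ih f [] ((cur.reverse) :: acc) (by simpa using hf)]
        simp [pvSplitQ]
      · have hpre : List.isPrefixOf [q] (c :: r) = false := by
          simp [List.isPrefixOf]; exact fun h => absurd h.symm hc
        simp only [PySem.Chars.splitOn.go, hpre, Bool.false_eq_true, if_false]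
        rw [ih f (c :: cur) acc (by simp at hf ⊢; omega)]
        simp [pvSplitQ, hc]

theorem pvSplitOn_eq (q : Char) (s : List Char) :
    PySem.Chars.splitOn s [q] = (pvSplitQ q s).1 :: (pvSplitQ q s).2 := by
  have := pvSplitOn_go_eq q s (s.length + 1) [] [] (by omega)
  simpa [PySem.Chars.splitOn] using this

-- the split segments contain no separator
theorem pvSplitQ_not_mem (q : Char) (s : List Char) :
    q ∉ (pvSplitQ q s).1 ∧ ∀ t ∈ (pvSplitQ q s).2, q ∉ t := by
  induction s with
  | nil => simp [pvSplitQ]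
  | cons c r ih =>
    by_cases hc : c = q
    · subst hc
      rw [show pvSplitQ c (c :: r) = ([], (pvSplitQ c r).1 :: (pvSplitQ c r).2) from if_pos rfl]
      refine ⟨by simp, ?_⟩
      intro t ht
      simp only [List.mem_cons] at ht
      rcases ht with rfl | ht
      · exact ih.1
      · exact ih.2 t ht
    · simp only [pvSplitQ, if_neg hc]
      refine ⟨?_, ih.2⟩
      simp only [List.mem_cons, not_or]
      exact ⟨Ne.symm hc, ih.1⟩

-- rebuilding the line from its segments
theorem pvSplitQ_join (q : Char) (s : List Char) :
    (pvSplitQ q s).1 ++ ((pvSplitQ q s).2.map (fun t => q :: t)).flatten = s := by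
  induction s with
  | nil => simp [pvSplitQ]
  | cons c r ih =>
    by_cases hc : c = q
    · subst hc; simp [pvSplitQ, ih]
    · simp [pvSplitQ, hc, ih]

-- A's scan across a quote-free segment while in_quotes: everything is appended
theorem pvA_seg_odd (s : List Char) (hq : '"' ∉ s) (ps : List (List Char)) (cur : List Char) :
    s.foldl pvA_scanStep (ps, cur, true) = (ps, cur ++ s, true) := by
  induction s generalizing cur with
  | nil => simp
  | cons c r ih =>
    simp only [List.mem_cons, not_or] at hq
    have hc : ¬ c = '"' := fun h => hq.1 h.symm
    have h1 : pvA_scanStep (ps, cur, true) c = (ps, cur ++ [c], true) := by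
      simp [pvA_scanStep, hc]
    rw [List.foldl_cons, h1, ih hq.2 (cur ++ [c])]
    simp

-- A's scan across a quote-free segment while not in_quotes: comma-split, strip, filter
theorem pvA_seg_even (s : List Char) (hq : '"' ∉ s) (P : List (List Char)) (cur : List Char) :
    s.foldl pvA_scanStep (pvStripF P, cur, false) =
      (pvStripF (P ++ ((cur ++ (pvSplitQ ',' s).1) :: (pvSplitQ ',' s).2).dropLast),
       ((cur ++ (pvSplitQ ',' s).1) :: (pvSplitQ ',' s).2).getLastD [], false) := by
  induction s generalizing P cur with
  | nil => simp [pvSplitQ]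
  | cons c r ih =>
    simp only [List.mem_cons, not_or] at hq
    have hc : ¬ c = '"' := fun h => hq.1 h.symm
    by_cases hcm : c = ','
    · subst hcm
      have h1 : pvA_scanStep (pvStripF P, cur, false) ',' =
          (pvStripF (P ++ [cur]), [], false) := by
        simp only [pvA_scanStep]
        rw [if_neg (show ¬ (',' = '"') by decide), if_pos ⟨trivial, trivial⟩]
        rw [pvStripF_append, pvStripF_cons]
        split_ifs <;> simp [pvStripF]
      rw [List.foldl_cons, h1, ih hq.2 (P ++ [cur]) []]
      rcases h2 : pvSplitQ ',' r with ⟨h', t'⟩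
      rw [show pvSplitQ ',' (',' :: r) =
            ([], (pvSplitQ ',' r).1 :: (pvSplitQ ',' r).2) from if_pos rfl, h2]
      simp
    · have h1 : pvA_scanStep (pvStripF P, cur, false) c =
          (pvStripF P, cur ++ [c], false) := by
        simp [pvA_scanStep, hc, hcm]
      rw [List.foldl_cons, h1, ih hq.2 P (cur ++ [c])]
      rcases h2 : pvSplitQ ',' r with ⟨h', t'⟩
      simp only [pvSplitQ, if_neg hcm, h2]
      simp

-- the main correspondence: A's scan over the rest of the line vs B's fold over enumerated segments
theorem pvCorr (t : List (List Char)) (hq : ∀ s ∈ t, '"' ∉ s) :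
    ∀ (i : Int), 1 ≤ i → ∀ (P : List (List Char)) (cur : List Char),
      (let st := (t.flatMap (fun s => '"' :: s)).foldl pvA_scanStep
                   (pvStripF P, cur, decide (PySem.Int.mod i 2 = 0));
       if PySem.Chars.strip st.2.1 ≠ [] then st.1 ++ [PySem.Chars.strip st.2.1] else st.1) =
      pvStripF ((PySem.List.enumerate t i).foldl pvB_segStep (P ++ [cur])) := by
  induction t with
  | nil =>
    intro i _ P cur
    simp only [List.flatMap_nil, List.foldl_nil, PySem.List.enumerate]
    rw [pvStripF_append, pvStripF_cons]
    split_ifs <;> simp [pvStripF]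
  | cons s t' ih =>
    intro i hi P cur
    simp only [List.mem_cons] at hq
    have hqs : '"' ∉ s := hq s (Or.inl rfl)
    have hqt : ∀ u ∈ t', '"' ∉ u := fun u hu => hq u (Or.inr hu)
    have henum : PySem.List.enumerate (s :: t') i = (i, s) :: PySem.List.enumerate t' (i + 1) := rfl
    have hquote : pvA_scanStep (pvStripF P, cur, decide (PySem.Int.mod i 2 = 0)) '"' =
        (pvStripF P, cur ++ ['"'], !decide (PySem.Int.mod i 2 = 0)) := by
      simp [pvA_scanStep]
    have hmod : PySem.Int.mod i 2 = i % 2 := PySem.Int.mod_eq_emod_of_pos (by omega)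
    have hmodS : PySem.Int.mod (i + 1) 2 = (i + 1) % 2 := PySem.Int.mod_eq_emod_of_pos (by omega)
    have hiz : i ≠ 0 := by omega
    simp only [List.flatMap_cons, List.cons_append, List.foldl_cons, List.foldl_append, hquote,
      henum]
    by_cases hpar : i % 2 = 0
    · -- segment at even index: A scans it out of quotes, B splits it on commas
      have hb0 : decide (PySem.Int.mod i 2 = 0) = true := by simp [hpar]
      have hb1 : decide (PySem.Int.mod (i + 1) 2 = 0) = false := by
        simp; omega
      rw [hb0]
      rcases h2 : pvSplitQ ',' s with ⟨h, t⟩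
      have hseg := pvA_seg_even s hqs P (cur ++ ['"'])
      rw [h2] at hseg
      simp only [Bool.not_true, hseg]
      have := ih hqt (i + 1) (by omega)
        (P ++ (((cur ++ ['"']) ++ h) :: t).dropLast) ((((cur ++ ['"']) ++ h) :: t).getLastD [])
      rw [hb1] at this
      rw [this]
      congr 2
      -- B's step on (i, s)
      simp only [pvB_segStep, hiz, if_pos, ne_eq, not_false_iff]
      rw [pvSplitOn_eq, h2]
      rw [if_pos (by rw [hmod]; exact hpar)]
      simp only [List.dropLast_concat, List.getLastD_concat, List.getD_cons_zero]
      rw [show PySem.List.slice (h :: t) (some 1) none = t by simp [pysem]]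
      rw [List.append_assoc P, pvDropLast_append_getLastD ((cur ++ ['"'] ++ h) :: t) (by simp)]
      simp
    · -- segment at odd index: A scans it inside quotes, B appends it whole
      have hb0 : decide (PySem.Int.mod i 2 = 0) = false := by simp [hpar]
      have hb1 : decide (PySem.Int.mod (i + 1) 2 = 0) = true := by
        simp; omega
      rw [hb0]
      simp only [Bool.not_false]
      rw [pvA_seg_odd s hqs (pvStripF P) (cur ++ ['"'])]
      have := ih hqt (i + 1) (by omega) P ((cur ++ ['"']) ++ s)
      rw [hb1] at this
      rw [this]
      congr 2
      simp only [pvB_segStep, hiz, ne_eq, not_false_iff, if_true]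
      rw [if_neg (by rw [hmod]; omega)]
      simp

-- phase 2: folding B's piece loop = folding A's pair loop over the stripped non-empty pieces
theorem pvPhase2 (l : List (List Char)) (d : PySem.Dict String String) :
    l.foldl pvB_pieceStep d = (pvStripF l).foldl pvA_pairStep d := by
  induction l generalizing d with
  | nil => simp [pvStripF]
  | cons x r ih =>
    rw [List.foldl_cons, pvStripF_cons]
    by_cases hx : PySem.Chars.strip x = []
    · rw [if_neg (by simpa using hx)]
      simp only [List.nil_append]
      rw [ih]
      congr 1
      simp [pvB_pieceStep, hx]
    · rw [if_pos (by simpa using hx)]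
      simp only [List.cons_append, List.nil_append, List.foldl_cons]
      rw [ih]
      congr 1
      simp only [pvB_pieceStep, pvA_pairStep, hx, ne_eq, not_false_iff, true_and]

-- the whole pipeline, on the post-':' character list
theorem pvMain (cs : List Char) :
    (let st := cs.foldl pvA_scanStep ([], [], false)
     let pairs := if PySem.Chars.strip st.2.1 ≠ [] then st.1 ++ [PySem.Chars.strip st.2.1] else st.1
     (pairs.foldl pvA_pairStep PySem.Dict.empty).items) =
    ((((PySem.List.enumerate (PySem.Chars.splitOn cs ['"'])).foldl pvB_segStep
        [[]]).foldl pvB_pieceStep PySem.Dict.empty).items) := by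
  rcases hQ : pvSplitQ '"' cs with ⟨S0, T0⟩
  have hjoin : cs = S0 ++ T0.flatMap (fun t => '"' :: t) := by
    have := pvSplitQ_join '"' cs
    rw [hQ] at this
    simpa [List.flatMap] using this.symm
  have hnm := pvSplitQ_not_mem '"' cs
  rw [hQ] at hnm
  rcases h0 : pvSplitQ ',' S0 with ⟨h, t⟩
  have hseg := pvA_seg_even S0 hnm.1 [] []
  rw [h0] at hseg
  have hcorr := pvCorr T0 hnm.2 1 (by omega) ((h :: t).dropLast) ((h :: t).getLastD [])
  have hb : decide (PySem.Int.mod 1 2 = 0) = false := by decide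
  rw [hb] at hcorr
  have hsplit : PySem.Chars.splitOn cs ['"'] = S0 :: T0 := by rw [pvSplitOn_eq, hQ]
  have henum : PySem.List.enumerate (S0 :: T0) 0 = (0, S0) :: PySem.List.enumerate T0 1 := rfl
  have hB0 : pvB_segStep [[]] (0, S0) = h :: t := by
    simp only [pvB_segStep, ne_eq, not_true_eq_false, if_false]
    rw [pvSplitOn_eq, h0]
    rw [show PySem.List.slice (h :: t) (some 1) none = t by simp [pysem]]
    simp
  conv_lhs => rw [hjoin]
  simp only [List.foldl_append, hsplit, henum, List.foldl_cons, hB0]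
  have hstate : List.foldl pvA_scanStep ([], [], false) S0 =
      (pvStripF ((h :: t).dropLast), (h :: t).getLastD [], false) := by
    have : (([], [], false) : List (List Char) × List Char × Bool) =
        (pvStripF [], [], false) := by simp [pvStripF]
    rw [this]
    simpa using hseg
  rw [pvDropLast_append_getLastD (h :: t) (by simp)] at hcorr
  rw [hstate, pvPhase2, ← hcorr]

-- ===== VERDICT (by name: the statement is the Claim_ definition above) =====
theorem parse_m3u8_attributes_spec : Claim_equal_parse_m3u8_attributes := by
  intro line _
  show parse_m3u8_attributes line = parse_m3u8_attributes_alt line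
  unfold parse_m3u8_attributes parse_m3u8_attributes_alt
  exact pvMain _
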